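-- pv_equiv track=rewrite | github.com/yashPedireddi/Molecular-Energy-Prediction-GNN | DatasetCreation.py | _should_reverse
-- ===== SOURCE A (Python) =====
-- from typing import Any, DefaultDict, Generator, Iterator, TypeVar
--
-- def _should_reverse(arr: list[Any]) -> bool:
--
--     middle = len(arr) // 2
--
--     for left, right in zip(arr[:middle], reversed(arr[middle:])):
--
--         if left == right:
--             continue
--         elif left < right:
--             return True
--         else:
--             return False
--
--     return False
-- ===== SOURCE B (Python) =====
-- def _should_reverse(arr: list) -> bool:
--     return arr < arr[::-1]
-- ===== Notes on version B (the rewrite author's own statement) =====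
-- stated objective: idiomatic
-- what changed: A's explicit half-length loop with early returns is replaced by a single built-in lexicographic comparison of the whole list against its reverse (arr < arr[::-1]).
import Mathlib
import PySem

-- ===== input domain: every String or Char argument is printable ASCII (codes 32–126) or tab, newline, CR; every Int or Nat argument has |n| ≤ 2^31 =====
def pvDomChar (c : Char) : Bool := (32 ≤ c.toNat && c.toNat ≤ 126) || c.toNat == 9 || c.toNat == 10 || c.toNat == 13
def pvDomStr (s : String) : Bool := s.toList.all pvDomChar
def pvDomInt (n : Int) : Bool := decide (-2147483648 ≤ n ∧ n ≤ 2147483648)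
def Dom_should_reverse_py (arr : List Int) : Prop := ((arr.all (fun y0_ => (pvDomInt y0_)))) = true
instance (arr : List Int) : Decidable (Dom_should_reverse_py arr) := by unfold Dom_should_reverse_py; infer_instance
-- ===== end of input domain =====

-- B replaces A's explicit half-length loop by Python's built-in lexicographic
-- comparison of the list against its full reverse (idiomatic, same cost).

-- ===== PORT A =====
-- the body of A's for-loop over zip(arr[:middle], reversed(arr[middle:])),
-- with the early returns: == → continue, < → True, otherwise → False
def srGo : List (Int × Int) → Bool
  | [] => false
  | (l, r) :: rest => if l == r then srGo rest else if l < r then true else false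

-- arr[:middle] and arr[middle:] with middle = len(arr)//2 ≥ 0 are take/drop
def should_reverse_py (arr : List Int) : Bool :=
  let middle := arr.length / 2
  srGo ((arr.take middle).zip (arr.drop middle).reverse)

-- ===== PORT B =====
-- Python's list `<`: elementwise ==-then-< with shorter-prefix-is-smaller
def lexLt : List Int → List Int → Bool
  | [], [] => false
  | [], _ :: _ => true
  | _ :: _, [] => false
  | a :: as, b :: bs => if a < b then true else if b < a then false else lexLt as bs

def should_reverse_py_alt (arr : List Int) : Bool := lexLt arr arr.reverse

-- ===== PRECONDITION & SPEC =====
def Spec_should_reverse_py (arr : List Int) (out : Bool) : Prop := out = should_reverse_py_alt arr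
instance (arr : List Int) (out : Bool) : Decidable (Spec_should_reverse_py arr out) := by unfold Spec_should_reverse_py; infer_instance

-- ===== CLAIM (what is proved, stated in full; the proofs are below) =====
def Claim_equal_should_reverse_py : Prop := ∀ (arr : List Int), Dom_should_reverse_py arr → Spec_should_reverse_py arr (should_reverse_py arr)

-- ===== LEMMAS AND PROOFS =====

-- on equal-length lists, Python's list `<` is exactly A's pair loop on the zip
theorem lexLt_eq_srGo_zip (xs : List Int) : ∀ ys : List Int,
    xs.length = ys.length → lexLt xs ys = srGo (xs.zip ys) := by
  induction xs with
  | nil => intro ys h; cases ys <;> simp_all [lexLt, srGo]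
  | cons a as ih =>
    intro ys h
    cases ys with
    | nil => simp at h
    | cons b bs =>
      simp only [List.length_cons, Nat.add_right_cancel_iff] at h
      rcases lt_trichotomy a b with hlt | heq | hgt
      · simp [lexLt, srGo, hlt, ne_of_lt hlt]
      · subst heq
        simp [lexLt, srGo, ih bs h]
      · simp [lexLt, srGo, not_lt.mpr (le_of_lt hgt), hgt, ne_of_gt hgt]

theorem srGo_append (P1 P2 : List (Int × Int)) :
    srGo (P1 ++ P2) =
      if P1.all (fun p => p.1 == p.2) then srGo P2 else srGo P1 := by
  induction P1 with
  | nil => simp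
  | cons p P1 ih =>
    obtain ⟨l, r⟩ := p
    by_cases h : (l == r) = true
    · simp only [List.cons_append, srGo, h, if_true, ih, List.all_cons, Bool.true_and]
    · simp [srGo, h]

theorem eq_of_zip_all_eq : ∀ xs ys : List Int, xs.length = ys.length →
    ((xs.zip ys).all (fun p => p.1 == p.2)) = true → xs = ys := by
  intro xs
  induction xs with
  | nil => intro ys h _; cases ys <;> simp_all
  | cons a as ih =>
    intro ys h hall
    cases ys with
    | nil => simp at h
    | cons b bs =>
      simp only [List.zip_cons_cons, List.all_cons, Bool.and_eq_true, beq_iff_eq] at hall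
      simp only [List.length_cons, Nat.add_right_cancel_iff] at h
      exact by rw [hall.1, ih bs h hall.2]

theorem srGo_zip_self (xs : List Int) : srGo (xs.zip xs) = false := by
  induction xs with
  | nil => rfl
  | cons a as ih => simp [srGo, ih]

theorem reverse_of_len_le_one {α : Type} (v : List α) (h : v.length ≤ 1) :
    v.reverse = v := by
  cases v with
  | nil => rfl
  | cons a t => cases t <;> simp_all

-- ===== VERDICT (by name: the statement is the Claim_ definition above) =====
theorem should_reverse_py_spec : Claim_equal_should_reverse_py := by
  intro arr _
  unfold Spec_should_reverse_py should_reverse_py should_reverse_py_alt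
  set n := arr.length with hn
  set m := n / 2 with hm
  set t := arr.take m with ht
  set r := arr.drop m with hr
  set u := r.reverse.take m with hu
  set v := r.reverse.drop m with hv
  have hmn : m ≤ n := Nat.div_le_self n 2
  have hlt : t.length = m := by simp [ht]; omega
  have hlr : r.length = n - m := by simp [hr, hn]
  have hlu : u.length = m := by simp [hu, hlr]; omega
  have hlv : v.length ≤ 1 := by simp [hv, hlr]; omega
  -- decompositions
  have harr : arr = t ++ r := (List.take_append_drop m arr).symm
  have hrev : arr.reverse = (u ++ v) ++ t.reverse := by
    rw [harr, List.reverse_append]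
    simp [hu, hv]
  have hzip : arr.zip arr.reverse = t.zip u ++ r.zip (v ++ t.reverse) := by
    calc arr.zip arr.reverse = (t ++ r).zip ((u ++ v) ++ t.reverse) := by
          rw [← harr, ← hrev]
      _ = t.zip u ++ r.zip (v ++ t.reverse) := by
          rw [List.append_assoc, List.zip_append (by omega)]
  have hAzip : t.zip r.reverse = t.zip u := by
    have : r.reverse = u ++ v := by simp [hu, hv]
    rw [this]
    have : t.zip (u ++ v) = (t ++ []).zip (u ++ v) := by simp
    rw [this, List.zip_append (by omega)]
    simp
  -- B's side via the zip loop
  have hB : lexLt arr arr.reverse = srGo (arr.zip arr.reverse) :=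
    lexLt_eq_srGo_zip arr arr.reverse (by simp)
  show srGo (t.zip r.reverse) = lexLt arr arr.reverse
  rw [hAzip, hB, hzip, srGo_append]
  by_cases hall : (t.zip u).all (fun p => p.1 == p.2) = true
  · -- first halves all equal: arr is a palindrome, both sides are false
    have htu : t = u := eq_of_zip_all_eq t u (by omega) hall
    have hrv : r = v ++ t.reverse := by
      have h1 : r.reverse = u ++ v := by simp [hu, hv]
      have h2 : r = (u ++ v).reverse := by rw [← h1, List.reverse_reverse]
      rw [h2, List.reverse_append, reverse_of_len_le_one v hlv, htu]
    rw [if_pos hall]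
    rw [show r.zip (v ++ t.reverse) = r.zip r by rw [← hrv]]
    rw [srGo_zip_self, htu, srGo_zip_self]
  · simp [hall]
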